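-- pv_equiv track=rewrite | github.com/Matthiti/Advent-of-Code-2019 | day_10.py | combine_asteroids
-- ===== SOURCE A (Python) =====
-- import collections
--
-- def combine_asteroids(asteroids):
-- 	res = collections.OrderedDict()
-- 	for a in asteroids:
-- 		if a[1] not in res:
-- 			res[a[1]] = [a[0]]
-- 		else:
-- 			res[a[1]].append(a[0])
-- 	return list(res.values())
-- ===== SOURCE B (Python) =====
-- def combine_asteroids(asteroids):
-- 	keys = []
-- 	for a in asteroids:
-- 		if a[1] not in keys:
-- 			keys.append(a[1])
-- 	return [[a[0] for a in asteroids if a[1] == k] for k in keys]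
-- ===== Notes on version B (the rewrite author's own statement) =====
-- stated objective: simpler
-- what changed: Replaces the incremental OrderedDict grouping with two independent passes: first collect the distinct second coordinates in first-appearance order, then build each group by a comprehension filtering the whole list; no dict or stdlib import is needed.
import Mathlib
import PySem

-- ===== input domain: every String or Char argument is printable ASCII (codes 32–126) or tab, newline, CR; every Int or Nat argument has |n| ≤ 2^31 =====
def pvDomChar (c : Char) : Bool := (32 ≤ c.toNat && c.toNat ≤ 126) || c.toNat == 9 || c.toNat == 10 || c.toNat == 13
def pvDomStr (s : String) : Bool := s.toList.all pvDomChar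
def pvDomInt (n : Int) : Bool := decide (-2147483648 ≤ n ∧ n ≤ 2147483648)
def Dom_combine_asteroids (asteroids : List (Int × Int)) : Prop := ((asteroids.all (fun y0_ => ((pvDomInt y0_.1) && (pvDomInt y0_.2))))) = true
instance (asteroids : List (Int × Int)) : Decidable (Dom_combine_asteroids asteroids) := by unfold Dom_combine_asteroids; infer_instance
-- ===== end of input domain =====

-- B replaces the incremental OrderedDict grouping with two independent passes
-- (distinct keys in first-appearance order, then one filtering comprehension per key): simpler, no dict needed.

-- ===== PORT A =====
-- for a in asteroids: if a[1] not in res: res[a[1]] = [a[0]] else: res[a[1]].append(a[0]); return list(res.values())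
def combine_asteroids (asteroids : List (Int × Int)) : List (List Int) :=
  (asteroids.foldl
    (fun res a =>
      if res.contains a.2 = false then res.insert a.2 [a.1]
      else res.modify a.2 [] (fun v => v ++ [a.1]))
    PySem.Dict.empty).values

-- ===== PORT B =====
-- keys = []; for a in asteroids: if a[1] not in keys: keys.append(a[1])
-- return [[a[0] for a in asteroids if a[1] == k] for k in keys]
def combine_asteroids_alt (asteroids : List (Int × Int)) : List (List Int) :=
  (asteroids.foldl (fun ks a => if a.2 ∈ ks then ks else ks ++ [a.2]) []).map
    (fun k => (asteroids.filter (fun a => a.2 == k)).map (fun a => a.1))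

-- ===== PRECONDITION & SPEC =====
def Spec_combine_asteroids (asteroids : List (Int × Int)) (out : List (List Int)) : Prop := out = combine_asteroids_alt asteroids
instance (asteroids : List (Int × Int)) (out : List (List Int)) : Decidable (Spec_combine_asteroids asteroids out) := by unfold Spec_combine_asteroids; infer_instance

-- ===== CLAIM (what is proved, stated in full; the proofs are below) =====
def Claim_equal_combine_asteroids : Prop := ∀ (asteroids : List (Int × Int)), Dom_combine_asteroids asteroids → Spec_combine_asteroids asteroids (combine_asteroids asteroids)

-- ===== LEMMAS AND PROOFS =====

-- A's two branches are both "append a.1 to the group at key a.2"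
theorem pv_step_eq (d : PySem.Dict Int (List Int)) (a : Int × Int) :
    (if d.contains a.2 = false then d.insert a.2 [a.1]
     else d.modify a.2 [] (fun v => v ++ [a.1])) = d.modify a.2 [] (fun v => v ++ [a.1]) := by
  by_cases h : d.contains a.2 = false
  · simp [h, PySem.Dict.modify, PySem.Dict.getD_of_not_contains d [] h]
  · simp [h]

-- a Dict with Nodup keys: values = keys.map (getD · d0)
theorem pv_values_eq {κ ν : Type} [BEq κ] [LawfulBEq κ] (d : PySem.Dict κ ν)
    (h : d.keys.Nodup) (d0 : ν) : d.values = d.keys.map (fun k => d.getD k d0) := by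
  show d.items.map (fun p => p.2) = (d.items.map (fun p => p.1)).map (fun k => d.getD k d0)
  rw [List.map_map]
  refine List.map_congr_left (fun p hp => ?_)
  exact (PySem.Dict.getD_of_mem_items d (k := p.1) (v := p.2) hp h d0).symm

-- B's key loop is PySem.Set.update [] of the second coordinates
theorem pv_keys_eq (asteroids : List (Int × Int)) :
    asteroids.foldl (fun ks a => if a.2 ∈ ks then ks else ks ++ [a.2]) [] =
      PySem.Set.update [] (asteroids.map (fun a => a.2)) := by
  show _ = (asteroids.map (fun a => a.2)).foldl PySem.Set.add []
  rw [List.foldl_map]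
  congr 1
  funext ks x
  by_cases h : x.2 ∈ ks <;> simp [PySem.Set.add, h]

theorem pv_main (asteroids : List (Int × Int)) :
    combine_asteroids asteroids = combine_asteroids_alt asteroids := by
  unfold combine_asteroids combine_asteroids_alt
  have hstep : (fun (res : PySem.Dict Int (List Int)) (a : Int × Int) =>
      if res.contains a.2 = false then res.insert a.2 [a.1]
      else res.modify a.2 [] (fun v => v ++ [a.1])) =
      (fun res a => res.modify a.2 [] (fun v => v ++ [a.1])) := by
    funext d a; exact pv_step_eq d a
  rw [hstep]
  have hnodup : (asteroids.foldl (fun res a => res.modify a.2 [] (fun v => v ++ [a.1]))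
      PySem.Dict.empty).keys.Nodup :=
    PySem.Dict.nodup_keys_foldl_modify_key asteroids (fun a => a.2) []
      (fun _ a v => v ++ [a.1]) PySem.Dict.empty (by rw [PySem.Dict.keys_empty]; exact List.nodup_nil)
  rw [pv_values_eq _ hnodup [],
      PySem.Dict.keys_foldl_modify_key asteroids (fun a => a.2) []
        (fun _ a v => v ++ [a.1]) PySem.Dict.empty,
      pv_keys_eq]
  rw [PySem.Dict.keys_empty]
  refine List.map_congr_left (fun k _ => ?_)
  -- the group at key k, via the swapped-pair grouping lemma
  have hswap : asteroids.foldl (fun d (a : Int × Int) => d.modify a.2 [] (fun v => v ++ [a.1]))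
      PySem.Dict.empty =
      (asteroids.map (fun a => (a.2, a.1))).foldl
        (fun d p => d.modify p.1 [] (fun v => v ++ [p.2])) PySem.Dict.empty := by
    rw [List.foldl_map]
  rw [hswap, PySem.Dict.getD_foldl_modify_append]
  simp [List.filter_map, Function.comp_def]

-- ===== VERDICT (by name: the statement is the Claim_ definition above) =====
theorem combine_asteroids_spec : Claim_equal_combine_asteroids := by
  intro asteroids _
  show _ = _
  exact pv_main asteroids
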